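-- pv_equiv track=rewrite | github.com/flaport/sax | src/sax/circuit.py | _port_modes_dict
-- ===== SOURCE A (Python) =====
-- def _port_modes_dict(port_modes: tuple[str, ...]) -> dict[str, set[str]]:
--     result = {}
--     for port_mode in port_modes:
--         port, mode = port_mode.split("@") if "@" in port_mode else (port_mode, None)
--         if port not in result:
--             result[port] = set()
--         if mode is not None:
--             result[port].add(mode)
--     return result
-- ===== SOURCE B (Python) =====
-- def _port_modes_dict(port_modes):
--     splits = [pm.split("@") for pm in port_modes]
--     ports = []
--     for parts in splits:
--         if parts[0] not in ports:
--             ports.append(parts[0])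
--     return {p: {parts[1] for parts in splits if parts[0] == p and len(parts) > 1}
--             for p in ports}
-- ===== Notes on version B (the rewrite author's own statement) =====
-- stated objective: alternative
-- what changed: B drops the dict-of-sets accumulator entirely: it splits once, collects the distinct ports in first-occurrence order into a list, then builds each port's mode set by a separate per-port scan over all split entries (O(n*k) nested scans instead of A's single dict-updating pass).
import Mathlib
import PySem

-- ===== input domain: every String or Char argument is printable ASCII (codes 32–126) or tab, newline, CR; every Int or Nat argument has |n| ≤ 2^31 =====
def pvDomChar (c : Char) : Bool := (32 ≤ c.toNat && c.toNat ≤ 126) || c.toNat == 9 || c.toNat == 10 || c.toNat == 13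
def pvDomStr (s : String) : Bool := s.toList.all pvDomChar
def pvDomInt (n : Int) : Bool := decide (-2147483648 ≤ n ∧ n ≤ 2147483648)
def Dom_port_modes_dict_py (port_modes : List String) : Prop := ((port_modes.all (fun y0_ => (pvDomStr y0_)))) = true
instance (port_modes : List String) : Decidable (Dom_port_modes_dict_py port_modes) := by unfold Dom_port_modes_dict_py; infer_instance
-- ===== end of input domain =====

-- B abandons A's dict-of-sets accumulator: it collects the distinct ports in first-occurrence
-- order into a list, then builds each port's mode set by a separate per-port scan over the split
-- entries — nested scans instead of A's single dict-updating pass; objective: alternative, not faster.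

-- ===== PORT A =====
def port_modes_dict_py (port_modes : List String) : List (String × List String) :=
  (port_modes.foldl
    (fun result port_mode =>
      -- port, mode = port_mode.split("@") if "@" in port_mode else (port_mode, None)
      -- (a split into ≠ 2 parts raises ValueError in Python; such inputs are outside Pre_)
      let pm : String × Option String :=
        if PySem.Str.isIn "@" port_mode then
          let parts := (PySem.Chars.splitOn port_mode.toList ['@']).map String.ofList
          (parts.headD "", parts[1]?)
        else (port_mode, none)
      let result := if result.contains pm.1 then result else result.insert pm.1 PySem.Set.empty
      match pm.2 with
      | some m => result.modify pm.1 PySem.Set.empty (fun s => PySem.Set.add s m)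
      | none => result)
    PySem.Dict.empty).items

-- ===== PORT B =====
def port_modes_dict_py_alt (port_modes : List String) : List (String × List String) :=
  -- splits = [pm.split("@") for pm in port_modes]
  let splits := port_modes.map (fun pm => (PySem.Chars.splitOn pm.toList ['@']).map String.ofList)
  -- ports = []; for parts in splits: if parts[0] not in ports: ports.append(parts[0])
  -- (parts[0] always exists since split never returns []; headD "" is exact here)
  let ports := splits.foldl
    (fun seen parts =>
      if seen.contains (parts.headD "") then seen else seen ++ [parts.headD ""]) []
  -- {p: {parts[1] for parts in splits if parts[0] == p and len(parts) > 1} for p in ports}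
  -- (parts.getD 1 "" is exact: the branch guarantees 1 < parts.length)
  ports.map (fun p =>
    (p, splits.foldl
        (fun s parts =>
          if parts.headD "" = p ∧ 1 < parts.length then PySem.Set.add s (parts.getD 1 "") else s)
        PySem.Set.empty))

-- ===== PRECONDITION & SPEC =====
-- Pre_ excludes exactly the strings with two or more '@', on which A's tuple unpacking of
-- split("@") raises ValueError.
def Pre_port_modes_dict_py (port_modes : List String) : Prop :=
  ∀ pm ∈ port_modes, pm.toList.count '@' ≤ 1
instance (port_modes : List String) : Decidable (Pre_port_modes_dict_py port_modes) := by
  unfold Pre_port_modes_dict_py; infer_instance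

def pvWitness_port_modes_dict_py : List String := ["in0@TE", "out0", "in0@TM", "@", "out0"]

def Spec_port_modes_dict_py (port_modes : List String) (out : List (String × List String)) : Prop := out = port_modes_dict_py_alt port_modes
instance (port_modes : List String) (out : List (String × List String)) : Decidable (Spec_port_modes_dict_py port_modes out) := by unfold Spec_port_modes_dict_py; infer_instance

-- ===== CLAIM (what is proved, stated in full; the proofs are below) =====
def Claim_equal_port_modes_dict_py : Prop := ∀ (port_modes : List String), Dom_port_modes_dict_py port_modes → Pre_port_modes_dict_py port_modes → Spec_port_modes_dict_py port_modes (port_modes_dict_py port_modes)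

-- ===== LEMMAS AND PROOFS =====

-- proof-side names for the loop bodies
def pvStepA (d : PySem.Dict String (PySem.Set String)) (port_mode : String) :
    PySem.Dict String (PySem.Set String) :=
  let pm : String × Option String :=
    if PySem.Str.isIn "@" port_mode then
      let parts := (PySem.Chars.splitOn port_mode.toList ['@']).map String.ofList
      (parts.headD "", parts[1]?)
    else (port_mode, none)
  let result := if d.contains pm.1 then d else d.insert pm.1 PySem.Set.empty
  match pm.2 with
  | some m => result.modify pm.1 PySem.Set.empty (fun s => PySem.Set.add s m)
  | none => result

def pvParts (pm : String) : List String :=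
  (PySem.Chars.splitOn pm.toList ['@']).map String.ofList

def pvStepM (d : PySem.Dict String (PySem.Set String)) (p : List String) :
    PySem.Dict String (PySem.Set String) :=
  d.modify (p.headD "") PySem.Set.empty (fun s => PySem.Set.update s (p.drop 1))

def pvStepK (k : String) (s : PySem.Set String) (p : List String) : PySem.Set String :=
  if k = p.headD "" then PySem.Set.update s (p.drop 1) else s

def pvStepB (k : String) (s : PySem.Set String) (p : List String) : PySem.Set String :=
  if p.headD "" = k ∧ 1 < p.length then PySem.Set.add s (p.getD 1 "") else s

lemma pvPortA_eq (pms : List String) :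
    port_modes_dict_py pms = (pms.foldl pvStepA PySem.Dict.empty).items := rfl

lemma pv_ports_eq (ps : List (List String)) :
    ps.foldl (fun seen parts =>
        if seen.contains (parts.headD "") then seen else seen ++ [parts.headD ""]) [] =
      PySem.Set.ofList (ps.map (fun p => p.headD "")) := by
  have hstep : (fun (seen : List String) parts =>
      if seen.contains (parts.headD "") then seen else seen ++ [parts.headD ""]) =
      (fun (seen : PySem.Set String) (parts : List String) => PySem.Set.add seen (parts.headD "")) := by
    funext seen parts
    simp [PySem.Set.add, PySem.Set.contains]
  rw [hstep, ← PySem.Set.update_map_eq_foldl_add, PySem.Set.update_nil_left]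

lemma pvPortB_eq (pms : List String) :
    port_modes_dict_py_alt pms =
      (PySem.Set.ofList ((pms.map pvParts).map (fun p => p.headD ""))).map
        (fun p => (p, (pms.map pvParts).foldl (pvStepB p) PySem.Set.empty)) := by
  unfold port_modes_dict_py_alt
  simp only [pv_ports_eq]
  rfl

-- ---- splitOn on a single-character separator ----

lemma pv_go_no_sep (l : List Char) (h : '@' ∉ l) :
    ∀ (fuel : Nat) (cur : List Char) (acc : List (List Char)),
      PySem.Chars.splitOn.go ['@'] fuel l cur acc = ((cur.reverse ++ l) :: acc).reverse := by
  induction l with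
  | nil =>
      intro fuel cur acc
      cases fuel <;> simp [PySem.Chars.splitOn.go]
  | cons c rest ih =>
      intro fuel cur acc
      have hc : c ≠ '@' := by intro hc; exact h (hc ▸ List.mem_cons_self ..)
      cases fuel with
      | zero => simp [PySem.Chars.splitOn.go]
      | succ f =>
          have hpre : List.isPrefixOf ['@'] (c :: rest) = false := by
            simp [List.isPrefixOf]
            exact fun hh => absurd hh.symm hc
          rw [PySem.Chars.splitOn.go.eq_def]
          simp only [hpre, Bool.false_eq_true, if_false]
          rw [ih (fun hm => h (List.mem_cons_of_mem _ hm)) f (c :: cur) acc]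
          simp

lemma pv_go_sep (l1 : List Char) (h : '@' ∉ l1) :
    ∀ (fuel : Nat) (l2 cur : List Char) (acc : List (List Char)), l1.length < fuel →
      PySem.Chars.splitOn.go ['@'] fuel (l1 ++ '@' :: l2) cur acc =
        PySem.Chars.splitOn.go ['@'] (fuel - (l1.length + 1)) l2 [] ((cur.reverse ++ l1) :: acc) := by
  induction l1 with
  | nil =>
      intro fuel l2 cur acc hf
      cases fuel with
      | zero => omega
      | succ f =>
          rw [PySem.Chars.splitOn.go.eq_def]
          simp [List.isPrefixOf]
  | cons c t ih =>
      intro fuel l2 cur acc hf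
      have hc : c ≠ '@' := by intro hc; exact h (hc ▸ List.mem_cons_self ..)
      cases fuel with
      | zero => omega
      | succ f =>
          have hpre : List.isPrefixOf ['@'] (c :: (t ++ '@' :: l2)) = false := by
            simp [List.isPrefixOf]
            exact fun hh => absurd hh.symm hc
          rw [PySem.Chars.splitOn.go.eq_def]
          simp only [List.cons_append, hpre, Bool.false_eq_true, if_false]
          rw [ih (fun hm => h (List.mem_cons_of_mem _ hm)) f l2 (c :: cur) acc (by
            simp only [List.length_cons] at hf ⊢; omega)]
          simp only [List.reverse_cons, List.append_assoc, List.singleton_append,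
            List.length_cons]
          have h1 : f - (t.length + 1) = f + 1 - (t.length + 1 + 1) := by omega
          rw [h1]

lemma pv_splitOn_no (l : List Char) (h : '@' ∉ l) :
    PySem.Chars.splitOn l ['@'] = [l] := by
  unfold PySem.Chars.splitOn
  rw [pv_go_no_sep l h]
  simp

lemma pv_splitOn_one (l1 l2 : List Char) (h1 : '@' ∉ l1) (h2 : '@' ∉ l2) :
    PySem.Chars.splitOn (l1 ++ '@' :: l2) ['@'] = [l1, l2] := by
  unfold PySem.Chars.splitOn
  rw [pv_go_sep l1 h1 _ l2 [] [] (by simp only [List.length_append, List.length_cons]; omega)]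
  rw [pv_go_no_sep l2 h2]
  simp

lemma pv_count_one_decomp (l : List Char) (h : l.count '@' = 1) :
    ∃ l1 l2, l = l1 ++ '@' :: l2 ∧ '@' ∉ l1 ∧ '@' ∉ l2 := by
  induction l with
  | nil => simp at h
  | cons c t ih =>
      by_cases hc : c = '@'
      · subst hc
        have : t.count '@' = 0 := by simpa [List.count_cons] using h
        exact ⟨[], t, by simp, by simp, by simpa [List.count_eq_zero] using this⟩
      · have ht : t.count '@' = 1 := by simpa [List.count_cons, hc] using h
        obtain ⟨l1, l2, rfl, h1, h2⟩ := ih ht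
        refine ⟨c :: l1, l2, by simp, ?_, h2⟩
        intro hm
        rcases List.mem_cons.mp hm with hh | hh
        · exact hc hh.symm
        · exact h1 hh

lemma pv_isIn_iff (pm : String) : PySem.Str.isIn "@" pm = true ↔ '@' ∈ pm.toList := by
  rw [PySem.Str.isIn_iff_infix]
  constructor
  · intro h
    have := h.sublist
    simpa using this.mem (by simp : '@' ∈ ("@" : String).toList)
  · intro h
    obtain ⟨s, t, hst⟩ := List.append_of_mem h
    exact ⟨s, t, by rw [hst]; simp⟩

-- shape of split under Pre_: one or two parts
lemma pv_parts_shape (pm : String) (h : pm.toList.count '@' ≤ 1) :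
    (∃ a, pvParts pm = [a]) ∨ (∃ a b, pvParts pm = [a, b]) := by
  by_cases hin : '@' ∈ pm.toList
  · have hc1 : pm.toList.count '@' = 1 :=
      le_antisymm h (List.count_pos_iff.mpr hin)
    obtain ⟨l1, l2, hdec, h1, h2⟩ := pv_count_one_decomp _ hc1
    right
    exact ⟨String.ofList l1, String.ofList l2, by
      unfold pvParts; rw [hdec, pv_splitOn_one l1 l2 h1 h2]; simp⟩
  · left
    exact ⟨String.ofList pm.toList, by
      unfold pvParts; rw [pv_splitOn_no _ hin]; simp⟩

-- ---- dict lemmas ----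

lemma pv_insert_getD_self {κ ν : Type} [BEq κ] [LawfulBEq κ]
    (d : PySem.Dict κ ν) (k : κ) (dflt : ν) (hnd : d.keys.Nodup) (hc : d.contains k = true) :
    d.insert k (d.getD k dflt) = d := by
  apply PySem.Dict.ext
  rw [PySem.Dict.items_insert_of_contains _ _ hc]
  conv_rhs => rw [← List.map_id d.items]
  apply List.map_congr_left
  intro p hp
  by_cases hk : p.1 = k
  · have hget : d.get? k = some p.2 := by
      rw [← hk]
      exact PySem.Dict.get?_of_mem_items _ (by simpa using hp) hnd
    simp only [id, hk, beq_self_eq_true, if_pos, PySem.Dict.getD, hget, Option.getD_some]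
    rw [← hk]
  · simp [hk]

-- A's loop body equals the modify-only body pvStepM on every string with at most one '@'
lemma pv_stepA_eq (d : PySem.Dict String (PySem.Set String)) (pm : String)
    (hnd : d.keys.Nodup) (h : pm.toList.count '@' ≤ 1) :
    pvStepA d pm = pvStepM d (pvParts pm) := by
  by_cases hin : '@' ∈ pm.toList
  · have hc1 : pm.toList.count '@' = 1 :=
      le_antisymm h (List.count_pos_iff.mpr hin)
    obtain ⟨l1, l2, hdec, h1, h2⟩ := pv_count_one_decomp _ hc1
    have hsplit : PySem.Chars.splitOn pm.toList ['@'] = [l1, l2] := by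
      rw [hdec]; exact pv_splitOn_one l1 l2 h1 h2
    have hIn : PySem.Str.isIn "@" pm = true := (pv_isIn_iff pm).mpr hin
    unfold pvStepA pvStepM pvParts
    rw [hsplit, hIn]
    simp only [if_pos, List.map_cons, List.map_nil, List.headD_cons, List.getElem?_cons_succ,
      List.getElem?_cons_zero, List.drop_succ_cons, List.drop_zero]
    have hupd : ∀ s : PySem.Set String, PySem.Set.update s [String.ofList l2] = PySem.Set.add s (String.ofList l2) := fun s => rfl
    by_cases hk : d.contains (String.ofList l1)
    · simp [hk, PySem.Dict.modify, hupd]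
    · simp only [hk, Bool.false_eq_true, if_false]
      rw [PySem.Dict.modify, PySem.Dict.modify]
      rw [PySem.Dict.getD_insert]
      simp only [if_pos]
      rw [PySem.Dict.insert_insert_self]
      rw [PySem.Dict.getD_of_not_contains _ _ (by simpa using hk)]
      simp [hupd]
  · have hc0 : '@' ∉ pm.toList := hin
    have hsplit : PySem.Chars.splitOn pm.toList ['@'] = [pm.toList] := pv_splitOn_no _ hc0
    have hIn : PySem.Str.isIn "@" pm = false := by
      rw [← Bool.not_eq_true, pv_isIn_iff]; exact hin
    unfold pvStepA pvStepM pvParts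
    rw [hsplit, hIn]
    simp only [Bool.false_eq_true, if_false, List.map_cons, List.map_nil, List.headD_cons,
      List.drop_succ_cons, List.drop_nil]
    have hmk : String.ofList pm.toList = pm := String.ofList_toList
    rw [hmk]
    have hupd : ∀ s : PySem.Set String, PySem.Set.update s ([] : List String) = s := fun s => rfl
    rw [PySem.Dict.modify]
    simp only [hupd]
    by_cases hk : d.contains pm
    · simp [hk, pv_insert_getD_self d pm _ hnd hk]
    · simp only [hk, Bool.false_eq_true, if_false]
      rw [PySem.Dict.getD_of_not_contains _ _ (by simpa using hk)]

lemma pv_nodup_stepM (d : PySem.Dict String (PySem.Set String)) (p : List String)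
    (hnd : d.keys.Nodup) : (pvStepM d p).keys.Nodup := by
  unfold pvStepM PySem.Dict.modify
  exact PySem.Dict.nodup_keys_insert _ _ _ hnd

lemma pv_foldA_eq (pms : List String) :
    ∀ (d : PySem.Dict String (PySem.Set String)), d.keys.Nodup →
      (∀ pm ∈ pms, pm.toList.count '@' ≤ 1) →
      pms.foldl pvStepA d = (pms.map pvParts).foldl pvStepM d := by
  induction pms with
  | nil => intro d _ _; rfl
  | cons pm rest ih =>
      intro d hnd hpre
      simp only [List.foldl_cons, List.map_cons]
      rw [pv_stepA_eq d pm hnd (hpre pm (List.mem_cons_self ..))]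
      exact ih _ (pv_nodup_stepM d _ hnd) (fun q hq => hpre q (List.mem_cons_of_mem _ hq))

-- value at k after the modify fold = per-key fold over the parts lists
lemma pv_getD_foldM (ps : List (List String)) (k : String) :
    ∀ (d : PySem.Dict String (PySem.Set String)),
      (ps.foldl pvStepM d).getD k PySem.Set.empty =
        ps.foldl (pvStepK k) (d.getD k PySem.Set.empty) := by
  induction ps with
  | nil => intro d; rfl
  | cons p rest ih =>
      intro d
      simp only [List.foldl_cons]
      rw [ih]
      congr 1
      unfold pvStepM pvStepK
      rw [PySem.Dict.getD_modify]
      split_ifs with hk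
      · rw [hk]
      · rfl

-- on one- or two-element parts lists, the per-key step equals B's comprehension step
lemma pv_stepK_eq_stepB (k : String) (p : List String)
    (h : (∃ a, p = [a]) ∨ (∃ a b, p = [a, b])) (s : PySem.Set String) :
    pvStepK k s p = pvStepB k s p := by
  rcases h with ⟨a, rfl⟩ | ⟨a, b, rfl⟩
  · by_cases hk : k = a <;>
      simp [pvStepK, pvStepB, PySem.Set.update, hk, eq_comm]
  · have hupd : PySem.Set.update s [b] = PySem.Set.add s b := rfl
    by_cases hk : k = a <;>
      simp [pvStepK, pvStepB, hupd, hk, eq_comm]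

-- ===== final assembly =====

theorem port_modes_dict_py_spec : Claim_equal_port_modes_dict_py := by
  intro pms _ hpre
  show _ = _
  rw [pvPortA_eq, pvPortB_eq]
  rw [pv_foldA_eq pms PySem.Dict.empty (by simp) hpre]
  set ps := pms.map pvParts with hps
  have hkeys1 : (ps.foldl pvStepM PySem.Dict.empty).keys = PySem.Set.ofList (ps.map (fun p => p.headD "")) := by
    unfold pvStepM
    rw [PySem.Dict.keys_foldl_modify_key ps (fun p => p.headD "") PySem.Set.empty
      (fun _ p => fun s => PySem.Set.update s (p.drop 1))]
    simp [PySem.Set.update_nil_left, PySem.Dict.keys_empty]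
  have hnd1 : (ps.foldl pvStepM PySem.Dict.empty).keys.Nodup := by
    unfold pvStepM
    exact PySem.Dict.nodup_keys_foldl_modify_key ps (fun p => p.headD "") PySem.Set.empty
      (fun _ p => fun s => PySem.Set.update s (p.drop 1)) _ (by simp)
  rw [PySem.Dict.items_eq_map_keys _ hnd1 PySem.Set.empty, hkeys1]
  apply List.map_congr_left
  intro k _
  congr 1
  rw [pv_getD_foldM]
  rw [PySem.Dict.getD_empty]
  apply PySem.List.foldl_congr_mem'
  intro p hp s
  obtain ⟨pm, hpm, rfl⟩ := List.mem_map.mp (hps ▸ hp)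
  exact pv_stepK_eq_stepB k _ (pv_parts_shape pm (hpre pm hpm)) s
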